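-- pv_equiv track=rewrite | github.com/albazzaztariq/UniLogic | Testing/Code for Testing/Intermediate/Python/T300_fizzbuzz/output.py | count_fizz
-- ===== SOURCE A (Python) =====
-- def fizzbuzz(n):
--     if ((n % 15) == 0):
--         return 'FizzBuzz'
--     else:
--         if ((n % 3) == 0):
--             return 'Fizz'
--         else:
--             if ((n % 5) == 0):
--                 return 'Buzz'
--             else:
--                 return str(n)
--
-- def count_fizz(limit):
--     count = 0
--     i = 1
--     while (i <= limit):
--         if (fizzbuzz(i) == 'Fizz'):
--             count = (count + 1)
--         i = (i + 1)
--     return count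
-- ===== SOURCE B (Python) =====
-- def count_fizz(limit):
--     if limit <= 0:
--         return 0
--     return limit // 3 - limit // 15
-- ===== Notes on version B (the rewrite author's own statement) =====
-- stated objective: faster
-- what changed: Replaces the 1..limit loop that tests each number with fizzbuzz by the closed form limit//3 - limit//15 (count of multiples of 3 that are not multiples of 5).
import Mathlib
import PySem

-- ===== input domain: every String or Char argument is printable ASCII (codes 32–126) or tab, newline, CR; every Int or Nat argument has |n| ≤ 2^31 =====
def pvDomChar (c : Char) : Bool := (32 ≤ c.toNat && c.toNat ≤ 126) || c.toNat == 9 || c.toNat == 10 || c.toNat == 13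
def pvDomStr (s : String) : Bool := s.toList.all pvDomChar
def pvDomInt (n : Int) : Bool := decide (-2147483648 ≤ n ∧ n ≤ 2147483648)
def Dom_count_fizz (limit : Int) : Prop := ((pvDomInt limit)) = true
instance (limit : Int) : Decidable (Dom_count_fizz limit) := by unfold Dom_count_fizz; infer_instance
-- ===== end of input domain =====

-- ===== PORT A =====
-- B replaces A's 1..limit loop by the closed form limit//3 - limit//15 (faster: O(1) vs O(limit)).

-- helper fizzbuzz from A's module
def fizzbuzzA (n : Int) : String :=
  if PySem.Int.mod n 15 = 0 then "FizzBuzz"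
  else if PySem.Int.mod n 3 = 0 then "Fizz"
  else if PySem.Int.mod n 5 = 0 then "Buzz"
  else PySem.Int.toStr n

-- A's while loop: state (count, i), runs while i ≤ limit
def countFizzLoop (limit i count : Int) : Int :=
  if _h : i ≤ limit then
    countFizzLoop limit (i + 1) (if fizzbuzzA i = "Fizz" then count + 1 else count)
  else count
termination_by (limit + 1 - i).toNat
decreasing_by omega

def count_fizz (limit : Int) : Int := countFizzLoop limit 1 0

-- ===== PORT B =====
def count_fizz_alt (limit : Int) : Int :=
  if limit ≤ 0 then 0
  else PySem.Int.floordiv limit 3 - PySem.Int.floordiv limit 15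

-- ===== PRECONDITION & SPEC =====
def Spec_count_fizz (limit : Int) (out : Int) : Prop := out = count_fizz_alt limit
instance (limit : Int) (out : Int) : Decidable (Spec_count_fizz limit out) := by unfold Spec_count_fizz; infer_instance

-- ===== CLAIM (what is proved, stated in full; the proofs are below) =====
def Claim_equal_count_fizz : Prop := ∀ (limit : Int), Dom_count_fizz limit → Spec_count_fizz limit (count_fizz limit)

-- ===== LEMMAS AND PROOFS =====

-- the last char of Nat.toDigitsCore with a nonempty accumulator is the accumulator's last char
theorem toDigitsCore_last (b : Nat) :
    ∀ (f n : Nat) (l : List Char) (c : Char),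
      (Nat.toDigitsCore b f n (l ++ [c])).getLast? = some c := by
  intro f
  induction f with
  | zero => intro n l c; rw [Nat.toDigitsCore]; exact List.getLast?_concat
  | succ f ih =>
    intro n l c
    rw [Nat.toDigitsCore]
    rw [show Nat.digitChar (n % b) :: (l ++ [c]) = (Nat.digitChar (n % b) :: l) ++ [c] from rfl]
    split
    · exact List.getLast?_concat
    · exact ih (n / b) (Nat.digitChar (n % b) :: l) c

theorem toDigits_last (n : Nat) :
    (Nat.toDigits 10 n).getLast? = some (Nat.digitChar (n % 10)) := by
  simp only [Nat.toDigits, Nat.toDigitsCore]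
  split
  · simp
  · exact toDigitsCore_last 10 n (n / 10) [] (Nat.digitChar (n % 10))

theorem digitChar_ne_z (n : Nat) : Nat.digitChar (n % 10) ≠ 'z' := by
  have h : n % 10 < 10 := Nat.mod_lt _ (by omega)
  interval_cases h' : n % 10 <;> simp [Nat.digitChar]

theorem toStr_ne_fizz (n : Int) : PySem.Int.toStr n ≠ "Fizz" := by
  intro h
  have h2 : (PySem.Int.toStr n).toList = "Fizz".toList := by rw [h]
  rw [PySem.Int.toList_toStr] at h2
  have hz : (PySem.Int.toChars n).getLast? = some 'z' := by rw [h2]; decide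
  have hd : (Nat.toDigits 10 n.natAbs).getLast? = some (Nat.digitChar (n.natAbs % 10)) :=
    toDigits_last n.natAbs
  simp only [PySem.Int.toChars] at hz
  split at hz
  · rename_i hneg
    rw [List.getLast?_cons, hd] at hz
    simp only [Option.getD_some] at hz
    exact digitChar_ne_z n.natAbs (by injection hz)
  · have : n.toNat = n.natAbs := by omega
    rw [this, hd] at hz
    exact digitChar_ne_z n.natAbs (by injection hz)

theorem fizz_iff (i : Int) : fizzbuzzA i = "Fizz" ↔ (¬ (15 ∣ i) ∧ 3 ∣ i) := by
  unfold fizzbuzzA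
  split_ifs with h15 h3 h5 <;>
    simp_all [toStr_ne_fizz i]

-- loop invariant: the remaining iterations contribute exactly the closed-form count on (i-1, limit]
theorem countFizzLoop_eq (limit : Int) :
    ∀ (n : Nat) (i c : Int), (limit + 1 - i).toNat = n → i ≤ limit + 1 →
      countFizzLoop limit i c =
        c + (limit / 3 - (i - 1) / 3) - (limit / 15 - (i - 1) / 15) := by
  intro n
  induction n with
  | zero =>
    intro i c hn hi
    have hie : i = limit + 1 := by omega
    subst hie
    rw [countFizzLoop, dif_neg (by omega)]
    have h0 : limit + 1 - 1 = limit := by ring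
    rw [h0]; ring
  | succ n ih =>
    intro i c hn hi
    have hle : i ≤ limit := by omega
    rw [countFizzLoop, dif_pos hle]
    rw [ih (i + 1) _ (by omega) (by omega)]
    by_cases hf : fizzbuzzA i = "Fizz"
    · rw [if_pos hf]
      obtain ⟨h15, h3⟩ := (fizz_iff i).mp hf
      have h1 : (i + 1 - 1) / 3 = (i - 1) / 3 + 1 := by omega
      have h2 : (i + 1 - 1) / 15 = (i - 1) / 15 := by omega
      rw [h1, h2]; ring
    · rw [if_neg hf]
      have := (fizz_iff i).not.mp hf
      by_cases h3 : (3 : Int) ∣ i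
      · have h15 : (15 : Int) ∣ i := by tauto
        have h1 : (i + 1 - 1) / 3 = (i - 1) / 3 + 1 := by omega
        have h2 : (i + 1 - 1) / 15 = (i - 1) / 15 + 1 := by omega
        rw [h1, h2]; ring
      · have h1 : (i + 1 - 1) / 3 = (i - 1) / 3 := by omega
        have h2 : (i + 1 - 1) / 15 = (i - 1) / 15 := by omega
        rw [h1, h2]

-- ===== VERDICT (by name: the statement is the Claim_ definition above) =====
theorem count_fizz_spec : Claim_equal_count_fizz := by
  intro limit _
  unfold Spec_count_fizz count_fizz count_fizz_alt
  by_cases hpos : limit ≤ 0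
  · rw [countFizzLoop, dif_neg (by omega), if_pos hpos]
  · rw [if_neg hpos]
    rw [countFizzLoop_eq limit (limit + 1 - 1).toNat 1 0 rfl (by omega)]
    rw [PySem.Int.floordiv_eq_ediv_of_pos (by omega), PySem.Int.floordiv_eq_ediv_of_pos (by omega)]
    norm_num
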